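-- pv_equiv track=rewrite | github.com/xialGuri/CodingTest-Study | 5th_week/표 편집/chuheeseung.py | solution
-- ===== SOURCE A (Python) =====
-- def solution(n, k, cmd):
--     answer = ['O' for _ in range(n)]
--     up = ['blank'] + [x for x in range(n - 1)]
--     down = [x for x in range(1, n)] + ['blank']
--     delete_stack = []
--
--     for command in cmd:
--         c = command.split()
--
--         if c[0] == 'U':
--             count = int(c[1])
--             for _ in range(count):
--                 k = up[k]
--
--         elif c[0] == 'D':
--             count = int(c[1])
--             for _ in range(count):
--                 k = down[k]
--
--         elif c[0] == 'C':
--             delete_stack.append(k)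
--             answer[k] = 'X'
--
--             # up[k] = blank : k가 현재 살아있는 리스트 중에서 맨 위에 있다는 뜻
--             # 삭제 후에 아래에서 k를 재정의할 때 현재 k의 바로 아래칸으로 설정할 것
--             # -> down[up[k]]를 설정하지 않아도 됨
--             # down[k]도 마찬가지임
--             # -> up[k], down[k]가 'blank'가 아닐 경우만 각각 체크하고 up, down 연결리스트를 업데이트해줌
--             if up[k] != 'blank':
--                 down[up[k]] = down[k]
--                 # down[원래 k기준으로 한칸 위에 있는 친구] = 원래 k가 down됐을 때 친구
--             if down[k] != 'blank':
--                 up[down[k]] = up[k]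
--
--             # 만약 기존의 k가 한 칸 더 내려갔을 때 blank면 맨 아래에 위치했다는 뜻
--             # -> k를 기존의 k보다 한 칸 위로 설정
--             # blank가 아니면 k보다 한칸 아래로 설정
--             if down[k] != 'blank':
--                 k = down[k]
--             else:
--                 k = up[k]
--
--         elif c[0] == 'Z':
--             d = delete_stack.pop()
--             answer[d] = 'O'
--
--             if up[d] != 'blank':
--                 down[up[d]] = d
--             if down[d] != 'blank':
--                 up[down[d]] = d
--
--     ans = ''
--
--     for a in answer:
--         ans += a
--
--     return ans
-- ===== SOURCE B (Python) =====
-- def solution(n, k, cmd):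
--     deleted = set()
--     stack = []
--     for command in cmd:
--         c = command.split()
--         if c[0] == 'U':
--             for _ in range(int(c[1])):
--                 k -= 1
--                 while k in deleted:
--                     k -= 1
--         elif c[0] == 'D':
--             for _ in range(int(c[1])):
--                 k += 1
--                 while k in deleted:
--                     k += 1
--         elif c[0] == 'C':
--             stack.append(k)
--             deleted.add(k)
--             j = k + 1
--             while j in deleted:
--                 j += 1
--             if j < n:
--                 k = j
--             else:
--                 j = k - 1
--                 while j in deleted:
--                     j -= 1
--                 k = j
--         elif c[0] == 'Z':
--             deleted.discard(stack.pop())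
--     return ''.join('X' if i in deleted else 'O' for i in range(n))
-- ===== Notes on version B (the rewrite author's own statement) =====
-- stated objective: simpler
-- what changed: A maintains doubly-linked up/down pointer arrays plus a mutated answer array; B keeps only a deleted-set and the undo stack, finds neighbours by scanning past deleted rows, and renders the answer at the end from the deleted-set.
-- outside the precondition, e.g. on solution(3, -2, ['C', 'C']): A returns 'OXX', B returns 'OOO'; on solution(2, 0, ['U 1']): A returns 'OO', B returns 'OO'; on solution(1, 0, ['C']): A returns 'X', B returns 'X'
import Mathlib
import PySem

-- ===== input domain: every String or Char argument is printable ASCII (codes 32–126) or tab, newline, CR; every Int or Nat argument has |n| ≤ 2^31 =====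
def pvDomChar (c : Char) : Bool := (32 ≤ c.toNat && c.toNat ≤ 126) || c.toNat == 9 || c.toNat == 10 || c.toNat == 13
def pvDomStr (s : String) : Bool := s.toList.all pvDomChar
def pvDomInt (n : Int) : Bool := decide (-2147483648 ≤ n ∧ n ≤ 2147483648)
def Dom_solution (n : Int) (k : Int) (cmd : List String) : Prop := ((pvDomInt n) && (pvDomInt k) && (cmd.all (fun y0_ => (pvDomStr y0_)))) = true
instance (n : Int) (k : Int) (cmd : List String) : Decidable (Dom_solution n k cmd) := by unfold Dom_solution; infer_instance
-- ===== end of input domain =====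

-- B replaces A's doubly-linked up/down pointer arrays and mutated answer array by a
-- deleted-set with nearest-alive scans, rebuilding the answer from the leftover stack
-- (objective: simpler; equivalence is about the return value only).

-- ===== PORT A =====
-- A's elements 'blank' | int are ported as Option Int (none = 'blank'); Python's k may
-- be reassigned to 'blank', so the ported cursor is Option Int as well.

-- 'for _ in range(count): k = arr[k]' (none = the TypeError/IndexError Python raises)
def pvWalkA (arr : List (Option Int)) : Option Int → Nat → Option (Option Int)
  | kk, 0 => some kk
  | kk, m+1 =>
    match kk with
    | none => none
    | some i =>
      match PySem.List.pyGet? arr i with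
      | none => none
      | some v => pvWalkA arr v m

structure PvStA where
  answer : List Char
  up : List (Option Int)
  down : List (Option Int)
  k : Option Int
  stack : List Int
  deriving DecidableEq, Repr

def pvStepA (st : PvStA) (command : String) : Option PvStA :=
  let c := PySem.Str.split₀ command
  match PySem.List.pyGet? c 0 with
  | none => none
  | some c0 =>
    if c0 = "U" then
      match PySem.List.pyGet? c 1 with
      | none => none
      | some s1 =>
        match PySem.Int.ofStr? s1 with
        | none => none
        | some count =>
          match pvWalkA st.up st.k count.toNat with
          | none => none
          | some k' => some { st with k := k' }
    else if c0 = "D" then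
      match PySem.List.pyGet? c 1 with
      | none => none
      | some s1 =>
        match PySem.Int.ofStr? s1 with
        | none => none
        | some count =>
          match pvWalkA st.down st.k count.toNat with
          | none => none
          | some k' => some { st with k := k' }
    else if c0 = "C" then
      match st.k with
      | none => none  -- answer['blank'] raises TypeError
      | some i =>
        let stack' := st.stack ++ [i]   -- delete_stack.append(k)
        match PySem.List.pySet? st.answer i 'X' with
        | none => none
        | some answer' =>
          match PySem.List.pyGet? st.up i, PySem.List.pyGet? st.down i with
          | some u, some d =>
            -- if up[k] != 'blank': down[up[k]] = down[k]
            match (match u with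
                   | none => some st.down
                   | some uu => PySem.List.pySet? st.down uu d) with
            | none => none
            | some down' =>
              -- if down[k] != 'blank': up[down[k]] = up[k]   (down[k] re-read after the write)
              match PySem.List.pyGet? down' i with
              | none => none
              | some d2 =>
                match (match d2 with
                       | none => some st.up
                       | some dd => PySem.List.pySet? st.up dd u) with
                | none => none
                | some up' =>
                  -- if down[k] != 'blank': k = down[k] else: k = up[k]
                  match d2 with
                  | some dd => some ⟨answer', up', down', some dd, stack'⟩
                  | none =>
                    match PySem.List.pyGet? up' i with
                    | none => none
                    | some u3 => some ⟨answer', up', down', u3, stack'⟩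
          | _, _ => none
    else if c0 = "Z" then
      match PySem.List.pop? st.stack with
      | none => none  -- pop from empty list
      | some (d, stack') =>
        match PySem.List.pySet? st.answer d 'O' with
        | none => none
        | some answer' =>
          match PySem.List.pyGet? st.up d, PySem.List.pyGet? st.down d with
          | some u, some _ =>
            -- if up[d] != 'blank': down[up[d]] = d
            match (match u with
                   | none => some st.down
                   | some uu => PySem.List.pySet? st.down uu (some d)) with
            | none => none
            | some down' =>
              -- if down[d] != 'blank': up[down[d]] = d   (down[d] re-read after the write)
              match PySem.List.pyGet? down' d with
              | none => none
              | some dn2 =>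
                match (match dn2 with
                       | none => some st.up
                       | some dd => PySem.List.pySet? st.up dd (some d)) with
                | none => none
                | some up' => some ⟨answer', up', down', st.k, stack'⟩
          | _, _ => none
    else
      some st

def solution (n : Int) (k : Int) (cmd : List String) : String :=
  let answer := (PySem.List.pyRange 0 n 1).map (fun _ => 'O')
  let up : List (Option Int) := none :: (PySem.List.pyRange 0 (n-1) 1).map some
  let down : List (Option Int) := (PySem.List.pyRange 1 n 1).map some ++ [none]
  match cmd.foldl (fun acc command => acc.bind (fun st => pvStepA st command))
        (some ⟨answer, up, down, some k, []⟩) with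
  | none => ""    -- unreachable under Pre_solution: Python raises on these inputs
  | some st => String.ofList (st.answer.foldl (fun acc a => acc ++ [a]) [])

-- ===== PORT B =====
-- 'while j in deleted: j -= 1' — fuel |deleted|+1 always suffices: deleted has distinct
-- elements and j moves strictly monotonically, so at most |deleted| iterations happen.
def pvScanDown (del : List Int) : Nat → Int → Int
  | 0, j => j
  | f+1, j => if del.contains j then pvScanDown del f (j-1) else j

def pvScanUp (del : List Int) : Nat → Int → Int
  | 0, j => j
  | f+1, j => if del.contains j then pvScanUp del f (j+1) else j

-- 'for _ in range(count): k -= 1; while k in deleted: k -= 1'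
def pvMoveUpB (del : List Int) : Int → Nat → Int
  | kk, 0 => kk
  | kk, m+1 => pvMoveUpB del (pvScanDown del (del.length + 1) (kk-1)) m

def pvMoveDownB (del : List Int) : Int → Nat → Int
  | kk, 0 => kk
  | kk, m+1 => pvMoveDownB del (pvScanUp del (del.length + 1) (kk+1)) m

structure PvStB where
  deleted : PySem.Set Int
  k : Int
  stack : List Int
  deriving DecidableEq, Repr

def pvStepB (n : Int) (st : PvStB) (command : String) : Option PvStB :=
  let c := PySem.Str.split₀ command
  match PySem.List.pyGet? c 0 with
  | none => none
  | some c0 =>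
    if c0 = "U" then
      match PySem.List.pyGet? c 1 with
      | none => none
      | some s1 =>
        match PySem.Int.ofStr? s1 with
        | none => none
        | some count => some { st with k := pvMoveUpB st.deleted st.k count.toNat }
    else if c0 = "D" then
      match PySem.List.pyGet? c 1 with
      | none => none
      | some s1 =>
        match PySem.Int.ofStr? s1 with
        | none => none
        | some count => some { st with k := pvMoveDownB st.deleted st.k count.toNat }
    else if c0 = "C" then
      let stack' := st.stack ++ [st.k]
      let del' := PySem.Set.add st.deleted st.k
      let j := pvScanUp del' (del'.length + 1) (st.k + 1)
      let k' := if j < n then j else pvScanDown del' (del'.length + 1) (st.k - 1)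
      some ⟨del', k', stack'⟩
    else if c0 = "Z" then
      match PySem.List.pop? st.stack with
      | none => none  -- pop from empty list
      | some (d, stack') => some ⟨PySem.Set.discard st.deleted d, st.k, stack'⟩
    else
      some st

def solution_alt (n : Int) (k : Int) (cmd : List String) : String :=
  match cmd.foldl (fun acc command => acc.bind (fun st => pvStepB n st command))
        (some ⟨PySem.Set.empty, k, []⟩) with
  | none => ""    -- unreachable under Pre_solution
  | some st =>
    String.ofList ((PySem.List.pyRange 0 n 1).map
      (fun i => if PySem.Set.contains st.deleted i then 'X' else 'O'))

-- ===== PRECONDITION & SPEC =====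
-- Pre_solution restricts effective commands to the problem's natural domain: whenever a
-- recognized U/D/C command acts, the cursor must be a real, alive 0-based row, U/D must
-- stay on the table, C must leave an alive row to move to, and Z needs a nonempty stack;
-- commands whose first token is not U/D/C/Z are ignored by both programs and stay inside.
-- It excludes (a) inputs where Python A raises (bad index, int() ValueError, pop from
-- empty, using the 'blank' cursor) and (b) inputs A only survives through Python's
-- negative-index wraparound or a cursor that fell off the table — see claim.json cites.

-- largest alive j ≤ c (rows < 0 do not exist); mirrors nothing in either port: it is the
-- declarative "nearest free row" used to state validity.  (pvPrevFreeF/pvNextFreeF are the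
-- kernel-computable fuel forms — the fuel is exactly the number of rows left to inspect,
-- so they EQUAL the well-founded definitions below: pvPrevFreeF_eq / pvNextFreeF_eq.)
def pvPrevFreeFAux (st : List Int) : Nat → Int → Option Int
  | 0, _ => none
  | f+1, c => if c < 0 then none else if c ∈ st then pvPrevFreeFAux st f (c-1) else some c

def pvPrevFreeF (st : List Int) (c : Int) : Option Int := pvPrevFreeFAux st (c+1).toNat c

def pvNextFreeFAux (n : Int) (st : List Int) : Nat → Int → Option Int
  | 0, _ => none
  | f+1, c => if n ≤ c then none else if c ∈ st then pvNextFreeFAux n st f (c+1) else some c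

def pvNextFreeF (n : Int) (st : List Int) (c : Int) : Option Int := pvNextFreeFAux n st (n-c).toNat c

def pvWalkS (st : List Int) : Int → Nat → Option Int
  | c, 0 => some c
  | c, m+1 =>
    match pvPrevFreeF st (c-1) with
    | none => none
    | some c' => pvWalkS st c' m

def pvWalkSD (n : Int) (st : List Int) : Int → Nat → Option Int
  | c, 0 => some c
  | c, m+1 =>
    match pvNextFreeF n st (c+1) with
    | none => none
    | some c' => pvWalkSD n st c' m

def pvStepS (n : Int) (s : Int × List Int) (command : String) : Option (Int × List Int) :=
  let c := PySem.Str.split₀ command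
  match PySem.List.pyGet? c 0 with
  | none => none
  | some c0 =>
    if c0 = "U" then
      match PySem.List.pyGet? c 1 with
      | none => none
      | some s1 =>
        match PySem.Int.ofStr? s1 with
        | none => none
        | some count =>
          if count ≤ 0 then some s
          else if 0 ≤ s.1 ∧ s.1 < n ∧ s.1 ∉ s.2 then
            match pvWalkS s.2 s.1 count.toNat with
            | none => none
            | some c' => some (c', s.2)
          else none
    else if c0 = "D" then
      match PySem.List.pyGet? c 1 with
      | none => none
      | some s1 =>
        match PySem.Int.ofStr? s1 with
        | none => none
        | some count =>
          if count ≤ 0 then some s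
          else if 0 ≤ s.1 ∧ s.1 < n ∧ s.1 ∉ s.2 then
            match pvWalkSD n s.2 s.1 count.toNat with
            | none => none
            | some c' => some (c', s.2)
          else none
    else if c0 = "C" then
      if 0 ≤ s.1 ∧ s.1 < n ∧ s.1 ∉ s.2 then
        let st' := s.1 :: s.2
        match pvNextFreeF n st' (s.1 + 1) with
        | some m => some (m, st')
        | none =>
          match pvPrevFreeF st' (s.1 - 1) with
          | some r => some (r, st')
          | none => none
      else none
    else if c0 = "Z" then
      match s.2 with
      | [] => none
      | _ :: rest => some (s.1, rest)
    else
      some s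

def pvRunS (n : Int) (k : Int) (cmd : List String) : Option (Int × List Int) :=
  cmd.foldl (fun acc command => acc.bind (fun s => pvStepS n s command)) (some (k, []))

def Pre_solution (n : Int) (k : Int) (cmd : List String) : Prop :=
  (pvRunS n k cmd).isSome = true
instance (n : Int) (k : Int) (cmd : List String) : Decidable (Pre_solution n k cmd) := by
  unfold Pre_solution; infer_instance

def pvWitness_solution : Int × Int × List String := (3, 1, ["D 1", "C", "U 1", "C", "Z", "hello"])

def Spec_solution (n : Int) (k : Int) (cmd : List String) (out : String) : Prop := out = solution_alt n k cmd
instance (n : Int) (k : Int) (cmd : List String) (out : String) : Decidable (Spec_solution n k cmd out) := by unfold Spec_solution; infer_instance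

-- ===== CLAIM (what is proved, stated in full; the proofs are below) =====
def Claim_equal_solution : Prop := ∀ (n : Int) (k : Int) (cmd : List String), Dom_solution n k cmd → Pre_solution n k cmd → Spec_solution n k cmd (solution n k cmd)

-- ===== LEMMAS AND PROOFS =====

-- the well-founded twins of pvPrevFreeF/pvNextFreeF, used by all proofs below
def pvPrevFree (st : List Int) (c : Int) : Option Int :=
  if c < 0 then none
  else if c ∈ st then pvPrevFree st (c-1)
  else some c
  termination_by (c+1).toNat
  decreasing_by simp_all

def pvNextFree (n : Int) (st : List Int) (c : Int) : Option Int :=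
  if n ≤ c then none
  else if c ∈ st then pvNextFree n st (c+1)
  else some c
  termination_by (n-c).toNat
  decreasing_by simp_all


-- the table rendered as a list of characters, one per row
def pvRender (n : Int) (st : List Int) : List Char :=
  (PySem.List.pyRange 0 n 1).map (fun i => if i ∈ st then 'X' else 'O')

def pvValidSt (n : Int) (st : List Int) : Prop :=
  st.Nodup ∧ ∀ d ∈ st, 0 ≤ d ∧ d < n

-- pointers of alive rows are the nearest alive neighbours
def pvPtrInv (n : Int) (st : List Int) (up down : List (Option Int)) : Prop :=
  ∀ i : Int, 0 ≤ i → i < n → i ∉ st →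
    PySem.List.pyGet? up i = some (pvPrevFree st (i-1)) ∧
    PySem.List.pyGet? down i = some (pvNextFree n st (i+1))

-- pointers of stacked (deleted) rows are their neighbours at deletion time
def pvStackInv (n : Int) (up down : List (Option Int)) : List Int → Prop
  | [] => True
  | d :: rest =>
      PySem.List.pyGet? up d = some (pvPrevFree rest (d-1)) ∧
      PySem.List.pyGet? down d = some (pvNextFree n rest (d+1)) ∧
      pvStackInv n up down rest

def pvInvA (n : Int) (s : Int × List Int) (a : PvStA) : Prop :=
  pvValidSt n s.2 ∧
  a.answer = pvRender n s.2 ∧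
  a.up.length = 1 + (n-1).toNat ∧
  a.down.length = 1 + (n-1).toNat ∧
  a.k = some s.1 ∧
  a.stack = s.2.reverse ∧
  pvPtrInv n s.2 a.up a.down ∧
  pvStackInv n a.up a.down s.2

def pvInvB (n : Int) (s : Int × List Int) (b : PvStB) : Prop :=
  pvValidSt n s.2 ∧
  b.deleted.Nodup ∧
  (∀ x : Int, x ∈ b.deleted ↔ x ∈ s.2) ∧
  b.k = s.1 ∧
  b.stack = s.2.reverse


-- the fuel forms compute the well-founded definitions
lemma pvPrevFreeF_eq (st : List Int) (c : Int) : pvPrevFreeF st c = pvPrevFree st c := by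
  fun_induction pvPrevFree st c with
  | case1 c hc =>
      unfold pvPrevFreeF
      have h0 : (c+1).toNat = 0 := by omega
      rw [h0]
      rfl
  | case2 c hc hm ih =>
      unfold pvPrevFreeF at ih ⊢
      have h1 : (c+1).toNat = ((c-1)+1).toNat + 1 := by omega
      rw [h1, pvPrevFreeFAux, if_neg hc, if_pos hm]
      exact ih
  | case3 c hc hm =>
      unfold pvPrevFreeF
      have h1 : (c+1).toNat = c.toNat + 1 := by omega
      rw [h1, pvPrevFreeFAux, if_neg hc, if_neg hm]

lemma pvNextFreeF_eq (n : Int) (st : List Int) (c : Int) : pvNextFreeF n st c = pvNextFree n st c := by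
  fun_induction pvNextFree n st c with
  | case1 c hc =>
      unfold pvNextFreeF
      have h0 : (n-c).toNat = 0 := by omega
      rw [h0]
      rfl
  | case2 c hc hm ih =>
      unfold pvNextFreeF at ih ⊢
      have h1 : (n-c).toNat = (n-(c+1)).toNat + 1 := by omega
      rw [h1, pvNextFreeFAux, if_neg hc, if_pos hm]
      exact ih
  | case3 c hc hm =>
      unfold pvNextFreeF
      have h1 : (n-c).toNat = (n-c-1).toNat + 1 := by omega
      rw [h1, pvNextFreeFAux, if_neg hc, if_neg hm]

-- characterisation of pvPrevFree / pvNextFree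
lemma pvPrevFree_spec {st : List Int} {c r : Int} (h : pvPrevFree st c = some r) :
    0 ≤ r ∧ r ≤ c ∧ r ∉ st ∧ ∀ y, r < y → y ≤ c → y ∈ st := by
  fun_induction pvPrevFree st c with
  | case1 c hc => simp at h
  | case2 c hc hm ih =>
      obtain ⟨h0, h1, h2, h3⟩ := ih h
      refine ⟨h0, by omega, h2, fun y hy1 hy2 => ?_⟩
      by_cases hy : y = c
      · subst hy; exact hm
      · exact h3 y hy1 (by omega)
  | case3 c hc hm =>
      simp at h; subst h
      exact ⟨by omega, le_refl _, hm, fun y hy1 hy2 => by omega⟩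

lemma pvPrevFree_all_of_none {st : List Int} {c : Int} (h : pvPrevFree st c = none) :
    ∀ y, 0 ≤ y → y ≤ c → y ∈ st := by
  fun_induction pvPrevFree st c with
  | case1 c hc => intro y h1 h2; omega
  | case2 c hc hm ih =>
      intro y h1 h2
      by_cases hy : y = c
      · subst hy; exact hm
      · exact ih h y h1 (by omega)
  | case3 c hc hm => simp at h

lemma pvPrevFree_eq_some {st : List Int} {c r : Int} (h0 : 0 ≤ r) (h1 : r ≤ c) (h2 : r ∉ st)
    (h3 : ∀ y, r < y → y ≤ c → y ∈ st) : pvPrevFree st c = some r := by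
  fun_induction pvPrevFree st c with
  | case1 c hc => omega
  | case2 c hc hm ih =>
      have hne : r ≠ c := fun he => h2 (he ▸ hm)
      exact ih (by omega) (fun y hy1 hy2 => h3 y hy1 (by omega))
  | case3 c hc hm =>
      have hr : r = c := by
        by_contra hne
        exact hm (h3 c (by omega) le_rfl)
      simp [hr]

lemma pvPrevFree_eq_none {st : List Int} {c : Int} (h : ∀ y, 0 ≤ y → y ≤ c → y ∈ st) :
    pvPrevFree st c = none := by
  fun_induction pvPrevFree st c with
  | case1 c hc => rfl
  | case2 c hc hm ih => exact ih (fun y h1 h2 => h y h1 (by omega))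
  | case3 c hc hm => exact absurd (h c (by omega) le_rfl) hm

lemma pvNextFree_spec {n : Int} {st : List Int} {c r : Int} (h : pvNextFree n st c = some r) :
    c ≤ r ∧ r < n ∧ r ∉ st ∧ ∀ y, c ≤ y → y < r → y ∈ st := by
  fun_induction pvNextFree n st c with
  | case1 c hc => simp at h
  | case2 c hc hm ih =>
      obtain ⟨h0, h1, h2, h3⟩ := ih h
      refine ⟨by omega, h1, h2, fun y hy1 hy2 => ?_⟩
      by_cases hy : y = c
      · subst hy; exact hm
      · exact h3 y (by omega) hy2
  | case3 c hc hm =>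
      simp at h; subst h
      exact ⟨le_refl _, by omega, hm, fun y hy1 hy2 => by omega⟩

lemma pvNextFree_all_of_none {n : Int} {st : List Int} {c : Int} (h : pvNextFree n st c = none) :
    ∀ y, c ≤ y → y < n → y ∈ st := by
  fun_induction pvNextFree n st c with
  | case1 c hc => intro y h1 h2; omega
  | case2 c hc hm ih =>
      intro y h1 h2
      by_cases hy : y = c
      · subst hy; exact hm
      · exact ih h y (by omega) h2
  | case3 c hc hm => simp at h

lemma pvNextFree_eq_some {n : Int} {st : List Int} {c r : Int} (h0 : c ≤ r) (h1 : r < n) (h2 : r ∉ st)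
    (h3 : ∀ y, c ≤ y → y < r → y ∈ st) : pvNextFree n st c = some r := by
  fun_induction pvNextFree n st c with
  | case1 c hc => omega
  | case2 c hc hm ih =>
      have hne : r ≠ c := fun he => h2 (he ▸ hm)
      exact ih (by omega) (fun y hy1 hy2 => h3 y (by omega) hy2)
  | case3 c hc hm =>
      have hr : r = c := by
        by_contra hne
        exact hm (h3 c le_rfl (by omega))
      simp [hr]

lemma pvNextFree_eq_none {n : Int} {st : List Int} {c : Int} (h : ∀ y, c ≤ y → y < n → y ∈ st) :
    pvNextFree n st c = none := by
  fun_induction pvNextFree n st c with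
  | case1 c hc => rfl
  | case2 c hc hm ih => exact ih (fun y h1 h2 => h y (by omega) h2)
  | case3 c hc hm => exact absurd (h c le_rfl (by omega)) hm


lemma pvCount_le {del : List Int} (hnd : del.Nodup) {a b : Int}
    (h : ∀ y, a ≤ y → y < b → y ∈ del) : (b - a).toNat ≤ del.length := by
  have hsub : PySem.List.pyRange a b 1 ⊆ del := by
    intro x hx
    rw [PySem.List.mem_pyRange_one] at hx
    exact h x hx.1 hx.2
  have := List.Subperm.length_le ((PySem.List.nodup_pyRange_one a b).subperm hsub)
  simpa [PySem.List.length_pyRange_one] using this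

lemma pvScanDown_eq_of {del st : List Int} (hmem : ∀ x : Int, x ∈ del ↔ x ∈ st) {c r : Int}
    (h : pvPrevFree st c = some r) : ∀ F, (c - r).toNat < F → pvScanDown del F c = r := by
  intro F
  induction F generalizing c with
  | zero => omega
  | succ f ih =>
      intro hF
      obtain ⟨h0, h1, h2, h3⟩ := pvPrevFree_spec h
      by_cases hc : c ∈ st
      · have hcc : del.contains c = true := by
          simp only [List.contains_eq_mem, decide_eq_true_eq]; exact (hmem c).mpr hc
        have hne : r ≠ c := fun he => h2 (he ▸ hc)
        rw [pvPrevFree, if_neg (by omega), if_pos hc] at h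
        simp only [pvScanDown, hcc, if_pos]
        exact ih h (by omega)
      · have hr : r = c := by
          by_contra hne
          exact hc (h3 c (by omega) le_rfl)
        subst hr
        simp only [pvScanDown, List.contains_eq_mem]
        simp only [decide_eq_true_eq, ite_eq_right_iff]
        exact fun hx => absurd ((hmem r).mp hx) hc

lemma pvScanUp_eq_of {n : Int} {del st : List Int} (hmem : ∀ x : Int, x ∈ del ↔ x ∈ st) {c m : Int}
    (h : pvNextFree n st c = some m) : ∀ F, (m - c).toNat < F → pvScanUp del F c = m := by
  intro F
  induction F generalizing c with
  | zero => omega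
  | succ f ih =>
      intro hF
      obtain ⟨h0, h1, h2, h3⟩ := pvNextFree_spec h
      by_cases hc : c ∈ st
      · have hcc : del.contains c = true := by
          simp only [List.contains_eq_mem, decide_eq_true_eq]; exact (hmem c).mpr hc
        have hne : m ≠ c := fun he => h2 (he ▸ hc)
        rw [pvNextFree, if_neg (by omega), if_pos hc] at h
        simp only [pvScanUp, hcc, if_pos]
        exact ih h (by omega)
      · have hr : m = c := by
          by_contra hne
          exact hc (h3 c le_rfl (by omega))
        subst hr
        simp only [pvScanUp, List.contains_eq_mem]
        simp only [decide_eq_true_eq, ite_eq_right_iff]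
        exact fun hx => absurd ((hmem m).mp hx) hc

lemma pvScanUp_eq_n_of {n : Int} {del st : List Int} (hmem : ∀ x : Int, x ∈ del ↔ x ∈ st)
    (hb : ∀ x ∈ st, x < n) {c : Int} (hc : c ≤ n)
    (h : pvNextFree n st c = none) : ∀ F, (n - c).toNat < F → pvScanUp del F c = n := by
  intro F
  induction F generalizing c with
  | zero => omega
  | succ f ih =>
      intro hF
      by_cases hcm : c ∈ st
      · have hcc : del.contains c = true := by
          simp only [List.contains_eq_mem, decide_eq_true_eq]; exact (hmem c).mpr hcm
        have hlt : c < n := hb c hcm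
        rw [pvNextFree, if_neg (by omega), if_pos hcm] at h
        simp only [pvScanUp, hcc, if_pos]
        exact ih (by omega) h (by omega)
      · have hcn : c = n := by
          by_contra hne
          have hlt : c < n := by omega
          rw [pvNextFree, if_neg (by omega), if_neg hcm] at h
          simp at h
        subst hcn
        simp only [pvScanUp, List.contains_eq_mem]
        simp only [decide_eq_true_eq, ite_eq_right_iff]
        exact fun hx => absurd ((hmem c).mp hx) hcm

lemma pvScanDown_run {del st : List Int} (hnd : del.Nodup) (hmem : ∀ x : Int, x ∈ del ↔ x ∈ st)
    {c r : Int} (h : pvPrevFree st c = some r) : pvScanDown del (del.length + 1) c = r := by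
  obtain ⟨h0, h1, h2, h3⟩ := pvPrevFree_spec h
  refine pvScanDown_eq_of hmem h _ ?_
  have := pvCount_le hnd (a := r + 1) (b := c + 1)
    (fun y hy1 hy2 => (hmem y).mpr (h3 y (by omega) (by omega)))
  omega

lemma pvScanUp_run {n : Int} {del st : List Int} (hnd : del.Nodup) (hmem : ∀ x : Int, x ∈ del ↔ x ∈ st)
    {c m : Int} (h : pvNextFree n st c = some m) : pvScanUp del (del.length + 1) c = m := by
  obtain ⟨h0, h1, h2, h3⟩ := pvNextFree_spec h
  refine pvScanUp_eq_of hmem h _ ?_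
  have := pvCount_le hnd (a := c) (b := m)
    (fun y hy1 hy2 => (hmem y).mpr (h3 y hy1 hy2))
  omega

lemma pvScanUp_run_n {n : Int} {del st : List Int} (hnd : del.Nodup) (hmem : ∀ x : Int, x ∈ del ↔ x ∈ st)
    (hb : ∀ x ∈ st, x < n) {c : Int} (hc : c ≤ n)
    (h : pvNextFree n st c = none) : pvScanUp del (del.length + 1) c = n := by
  refine pvScanUp_eq_n_of hmem hb hc h _ ?_
  have := pvCount_le hnd (a := c) (b := n)
    (fun y hy1 hy2 => (hmem y).mpr (pvNextFree_all_of_none h y hy1 hy2))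
  omega


-- indexing helpers (compositions of PySem lemmas for Int indices known nonnegative)
lemma pvSet_of_nonneg {α : Type} {l : List α} {i : Int} (h0 : 0 ≤ i) (h1 : i.toNat < l.length) (v : α) :
    PySem.List.pySet? l i v = some (l.set i.toNat v) := by
  have hi : ((i.toNat : Nat) : Int) = i := Int.toNat_of_nonneg h0
  have := PySem.List.pySet?_natCast l i.toNat v h1
  rwa [hi] at this

lemma pvGet_of_nonneg {α : Type} {l : List α} {i : Int} (h0 : 0 ≤ i) :
    PySem.List.pyGet? l i = l[i.toNat]? := PySem.List.pyGet?_of_nonneg l h0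

lemma pvSet_inRange {α : Type} {l l' : List α} {a : Int} {v : α} (ha : 0 ≤ a)
    (h : PySem.List.pySet? l a v = some l') : a.toNat < l.length := by
  by_contra hge
  rw [(PySem.List.pySet?_eq_none_iff l a v).mpr (by
    unfold PySem.Raise.InRange; omega)] at h
  simp at h

lemma pvGet_set_ne {α : Type} {l l' : List α} {a b : Int} {v : α} (ha : 0 ≤ a) (hb : 0 ≤ b)
    (hne : b ≠ a) (h : PySem.List.pySet? l a v = some l') :
    PySem.List.pyGet? l' b = PySem.List.pyGet? l b := by
  have h1 := pvSet_inRange ha h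
  rw [pvSet_of_nonneg ha h1 v] at h
  injection h with h'
  subst h'
  rw [pvGet_of_nonneg hb, pvGet_of_nonneg hb, List.getElem?_set_ne (by omega)]

lemma pvGet_set_self {α : Type} {l l' : List α} {a : Int} {v : α} (ha : 0 ≤ a)
    (h : PySem.List.pySet? l a v = some l') :
    PySem.List.pyGet? l' a = some v := by
  have h1 := pvSet_inRange ha h
  rw [pvSet_of_nonneg ha h1 v] at h
  injection h with h'
  subst h'
  rw [pvGet_of_nonneg ha, List.getElem?_set_self]
  simp [h1]

-- walking the up/down pointers = iterating the nearest-free-row function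
lemma pvWalkA_up {n : Int} {st : List Int} {up down : List (Option Int)}
    (hptr : pvPtrInv n st up down) :
    ∀ m (c c' : Int), 0 ≤ c → c < n → c ∉ st → pvWalkS st c m = some c' →
      pvWalkA up (some c) m = some (some c') ∧ (0 ≤ c' ∧ c' < n ∧ c' ∉ st) := by
  intro m
  induction m with
  | zero =>
      intro c c' h0 h1 h2 h
      simp only [pvWalkS, Option.some.injEq] at h
      subst h
      exact ⟨rfl, h0, h1, h2⟩
  | succ m ih =>
      intro c c' h0 h1 h2 h
      simp only [pvWalkS, pvPrevFreeF_eq] at h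
      cases hp : pvPrevFree st (c-1) with
      | none => rw [hp] at h; simp at h
      | some c1 =>
          rw [hp] at h
          obtain ⟨g0, g1, g2, g3⟩ := pvPrevFree_spec hp
          have hup := (hptr c h0 h1 h2).1
          simp only [pvWalkA, hup, hp]
          exact ih c1 c' g0 (by omega) g2 h

lemma pvWalkA_down {n : Int} {st : List Int} {up down : List (Option Int)}
    (hptr : pvPtrInv n st up down) :
    ∀ m (c c' : Int), 0 ≤ c → c < n → c ∉ st → pvWalkSD n st c m = some c' →
      pvWalkA down (some c) m = some (some c') ∧ (0 ≤ c' ∧ c' < n ∧ c' ∉ st) := by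
  intro m
  induction m with
  | zero =>
      intro c c' h0 h1 h2 h
      simp only [pvWalkSD, Option.some.injEq] at h
      subst h
      exact ⟨rfl, h0, h1, h2⟩
  | succ m ih =>
      intro c c' h0 h1 h2 h
      simp only [pvWalkSD, pvNextFreeF_eq] at h
      cases hp : pvNextFree n st (c+1) with
      | none => rw [hp] at h; simp at h
      | some c1 =>
          rw [hp] at h
          obtain ⟨g0, g1, g2, g3⟩ := pvNextFree_spec hp
          have hdn := (hptr c h0 h1 h2).2
          simp only [pvWalkA, hdn, hp]
          exact ih c1 c' (by omega) g1 g2 h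

lemma pvWalkB_up {del st : List Int} (hnd : del.Nodup) (hmem : ∀ x : Int, x ∈ del ↔ x ∈ st) :
    ∀ m (c c' : Int), pvWalkS st c m = some c' → pvMoveUpB del c m = c' := by
  intro m
  induction m with
  | zero => intro c c' h; simp only [pvWalkS, Option.some.injEq] at h; subst h; rfl
  | succ m ih =>
      intro c c' h
      simp only [pvWalkS, pvPrevFreeF_eq] at h
      cases hp : pvPrevFree st (c-1) with
      | none => rw [hp] at h; simp at h
      | some c1 =>
          rw [hp] at h
          simp only [pvMoveUpB, pvScanDown_run hnd hmem hp]
          exact ih c1 c' h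

lemma pvWalkB_down {n : Int} {del st : List Int} (hnd : del.Nodup) (hmem : ∀ x : Int, x ∈ del ↔ x ∈ st) :
    ∀ m (c c' : Int), pvWalkSD n st c m = some c' → pvMoveDownB del c m = c' := by
  intro m
  induction m with
  | zero => intro c c' h; simp only [pvWalkSD, Option.some.injEq] at h; subst h; rfl
  | succ m ih =>
      intro c c' h
      simp only [pvWalkSD, pvNextFreeF_eq] at h
      cases hp : pvNextFree n st (c+1) with
      | none => rw [hp] at h; simp at h
      | some c1 =>
          rw [hp] at h
          simp only [pvMoveDownB, pvScanUp_run hnd hmem hp]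
          exact ih c1 c' h

-- rendering
lemma pvRender_length {n : Int} {st : List Int} : (pvRender n st).length = n.toNat := by
  simp [pvRender, PySem.List.length_pyRange_one]

lemma pvRender_set {n : Int} {st st' : List Int} {c : Int} {ch : Char} (h0 : 0 ≤ c) (h1 : c < n)
    (hmem : ∀ x : Int, x ≠ c → (x ∈ st ↔ x ∈ st'))
    (hch : (if c ∈ st' then 'X' else 'O') = ch) :
    PySem.List.pySet? (pvRender n st) c ch = some (pvRender n st') := by
  have hlen : c.toNat < (pvRender n st).length := by rw [pvRender_length]; omega
  rw [pvSet_of_nonneg h0 hlen ch]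
  congr 1
  apply List.ext_getElem
  · simp [pvRender_length]
  · intro i hi hi'
    rw [pvRender_length] at hi'
    simp only [List.getElem_set, pvRender, List.getElem_map,
      PySem.List.getElem_pyRange_one, zero_add]
    by_cases hic : c.toNat = i
    · rw [if_pos hic]
      have hci : (i : Int) = c := by omega
      rw [← hch, hci]
    · rw [if_neg hic]
      have hne : (i : Int) ≠ c := by omega
      by_cases hx : (i : Int) ∈ st <;> simp_all [hmem (i : Int) hne]

-- untouched entries keep the stack invariant
lemma pvStackInv_congr {n : Int} {up down up' down' : List (Option Int)} :
    ∀ {st : List Int},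
    (∀ e ∈ st, PySem.List.pyGet? up' e = PySem.List.pyGet? up e) →
    (∀ e ∈ st, PySem.List.pyGet? down' e = PySem.List.pyGet? down e) →
    pvStackInv n up down st → pvStackInv n up' down' st
  | [], _, _, _ => trivial
  | d :: rest, hup, hdown, h => by
      obtain ⟨h1, h2, h3⟩ := h
      refine ⟨?_, ?_, pvStackInv_congr (fun e he => hup e (by simp [he])) (fun e he => hdown e (by simp [he])) h3⟩
      · rw [hup d (by simp), h1]
      · rw [hdown d (by simp), h2]

-- the abstract step preserves validity
lemma pvEraseIdx_append {α : Type} (xs : List α) (x : α) : (xs ++ [x]).eraseIdx xs.length = xs := by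
  induction xs with
  | nil => rfl
  | cons a t ih => simpa [List.eraseIdx] using ih

lemma pvPop_append {α : Type} (xs : List α) (x : α) :
    PySem.List.pop? (xs ++ [x]) (-1) = some (x, xs) := by
  simp [PySem.List.pop?, PySem.List.pyIdx?, pvEraseIdx_append]

-- B simulates the abstract step
lemma pvStepB_sim {n : Int} {s s' : Int × List Int} {command : String}
    (h : pvStepS n s command = some s') {b : PvStB} (hb : pvInvB n s b) :
    ∃ b', pvStepB n b command = some b' ∧ pvInvB n s' b' := by
  obtain ⟨hvs, hnd, hmem, hk, hstk⟩ := hb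
  simp only [pvStepS] at h
  simp only [pvPrevFreeF_eq, pvNextFreeF_eq] at h
  simp only [pvStepB]
  cases hp0 : PySem.List.pyGet? (PySem.Str.split₀ command) 0 with
  | none => simp only [hp0] at h; simp at h
  | some c0 =>
      simp only [hp0] at h ⊢
      by_cases hU : c0 = "U"
      · rw [if_pos hU] at h ⊢
        cases hp1 : PySem.List.pyGet? (PySem.Str.split₀ command) 1 with
        | none => simp only [hp1] at h; simp at h
        | some s1 =>
            simp only [hp1] at h ⊢
            cases hp2 : PySem.Int.ofStr? s1 with
            | none => simp only [hp2] at h; simp at h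
            | some count =>
                simp only [hp2] at h ⊢
                refine ⟨⟨b.deleted, pvMoveUpB b.deleted b.k count.toNat, b.stack⟩, rfl, ?_⟩
                by_cases hle : count ≤ 0
                · rw [if_pos hle] at h
                  injection h with h'
                  subst h'
                  have h0 : count.toNat = 0 := by omega
                  rw [h0]
                  exact ⟨hvs, hnd, hmem, hk, hstk⟩
                · rw [if_neg hle] at h
                  split at h
                  next halive =>
                    cases hw : pvWalkS s.2 s.1 count.toNat with
                    | none => rw [hw] at h; simp at h
                    | some c' =>
                        rw [hw] at h
                        injection h with h'
                        subst h'
                        rw [hk]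
                        exact ⟨hvs, hnd, hmem, pvWalkB_up hnd hmem _ _ _ hw, hstk⟩
                  next => simp at h
      · rw [if_neg hU] at h ⊢
        by_cases hD : c0 = "D"
        · rw [if_pos hD] at h ⊢
          cases hp1 : PySem.List.pyGet? (PySem.Str.split₀ command) 1 with
          | none => simp only [hp1] at h; simp at h
          | some s1 =>
              simp only [hp1] at h ⊢
              cases hp2 : PySem.Int.ofStr? s1 with
              | none => simp only [hp2] at h; simp at h
              | some count =>
                  simp only [hp2] at h ⊢
                  refine ⟨⟨b.deleted, pvMoveDownB b.deleted b.k count.toNat, b.stack⟩, rfl, ?_⟩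
                  by_cases hle : count ≤ 0
                  · rw [if_pos hle] at h
                    injection h with h'
                    subst h'
                    have h0 : count.toNat = 0 := by omega
                    rw [h0]
                    exact ⟨hvs, hnd, hmem, hk, hstk⟩
                  · rw [if_neg hle] at h
                    split at h
                    next halive =>
                      cases hw : pvWalkSD n s.2 s.1 count.toNat with
                      | none => rw [hw] at h; simp at h
                      | some c' =>
                          rw [hw] at h
                          injection h with h'
                          subst h'
                          rw [hk]
                          exact ⟨hvs, hnd, hmem, pvWalkB_down hnd hmem _ _ _ hw, hstk⟩
                    next => simp at h
        · rw [if_neg hD] at h ⊢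
          by_cases hC : c0 = "C"
          · rw [if_pos hC] at h ⊢
            split at h
            next halive =>
              rw [hk, hstk]
              have hnd' : (PySem.Set.add b.deleted s.1).Nodup := by
                rw [← hk]; exact PySem.Set.nodup_add _ _ hnd
              have hmem' : ∀ x : Int, x ∈ PySem.Set.add b.deleted s.1 ↔ x ∈ s.1 :: s.2 := by
                intro x
                rw [PySem.Set.mem_add, List.mem_cons]
                have hx := hmem x
                tauto
              have hbn : ∀ x ∈ s.1 :: s.2, x < n := by
                intro x hx
                rcases List.mem_cons.mp hx with rfl | hx'
                · exact halive.2.1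
                · exact (hvs.2 x hx').2
              have hstk' : s.2.reverse ++ [s.1] = (s.1 :: s.2).reverse := by
                rw [List.reverse_cons]
              have hvs' : pvValidSt n (s.1 :: s.2) := by
                refine ⟨List.nodup_cons.mpr ⟨halive.2.2, hvs.1⟩, ?_⟩
                intro d hd
                rcases List.mem_cons.mp hd with rfl | hd'
                · exact ⟨halive.1, halive.2.1⟩
                · exact hvs.2 d hd'
              cases hnf : pvNextFree n (s.1 :: s.2) (s.1 + 1) with
              | some m =>
                  rw [hnf] at h
                  injection h with h'
                  subst h'
                  have hj : pvScanUp (PySem.Set.add b.deleted s.1) ((PySem.Set.add b.deleted s.1).length + 1) (s.1 + 1) = m :=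
                    pvScanUp_run hnd' hmem' hnf
                  have hm := pvNextFree_spec hnf
                  refine ⟨_, rfl, hvs', hnd', hmem', ?_, hstk'⟩
                  dsimp only
                  rw [hj, if_pos hm.2.1]
              | none =>
                  rw [hnf] at h
                  have hj : pvScanUp (PySem.Set.add b.deleted s.1) ((PySem.Set.add b.deleted s.1).length + 1) (s.1 + 1) = n :=
                    pvScanUp_run_n hnd' hmem' hbn (by omega) hnf
                  cases hpf : pvPrevFree (s.1 :: s.2) (s.1 - 1) with
                  | none => rw [hpf] at h; simp at h
                  | some r =>
                      rw [hpf] at h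
                      injection h with h'
                      subst h'
                      refine ⟨_, rfl, hvs', hnd', hmem', ?_, hstk'⟩
                      dsimp only
                      rw [hj, if_neg (by omega)]
                      exact pvScanDown_run hnd' hmem' hpf
            next => simp at h
          · rw [if_neg hC] at h ⊢
            by_cases hZ : c0 = "Z"
            · rw [if_pos hZ] at h ⊢
              cases hstkc : s.2 with
              | nil => rw [hstkc] at h; simp at h
              | cons d rest =>
                  rw [hstkc] at h
                  injection h with h'
                  subst h'
                  have hpop : b.stack = rest.reverse ++ [d] := by
                    rw [hstk, hstkc, List.reverse_cons]
                  rw [hpop, pvPop_append]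
                  have hdnr : d ∉ rest := by
                    have := hvs.1
                    rw [hstkc] at this
                    exact (List.nodup_cons.mp this).1
                  refine ⟨_, rfl, ?_, PySem.Set.nodup_discard _ _ hnd, ?_, hk, rfl⟩
                  · have hv2 := hvs
                    rw [hstkc] at hv2
                    exact ⟨(List.nodup_cons.mp hv2.1).2, fun e he => hv2.2 e (by simp [he])⟩
                  · intro x
                    rw [PySem.Set.mem_discard, hmem, hstkc, List.mem_cons]
                    constructor
                    · rintro ⟨(rfl | hx), hne⟩
                      · exact absurd rfl hne
                      · exact hx
                    · intro hx
                      exact ⟨Or.inr hx, fun he => hdnr (he ▸ hx)⟩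
            · rw [if_neg hZ] at h ⊢
              injection h with h'
              subst h'
              exact ⟨b, rfl, hvs, hnd, hmem, hk, hstk⟩


-- transfer lemmas for inserting/removing one row from the alive set
lemma pvPrevFree_cons {n : Int} {L : List Int} {c i : Int} (hiL : i ∉ L) (hin : i < n)
    (hnd : ∀ dd, pvNextFree n L (c+1) = some dd → i ≠ dd) :
    pvPrevFree (c :: L) (i-1) = pvPrevFree L (i-1) := by
  cases hp : pvPrevFree L (i-1) with
  | none =>
      exact pvPrevFree_eq_none
        (fun y hy1 hy2 => List.mem_cons_of_mem _ (pvPrevFree_all_of_none hp y hy1 hy2))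
  | some r =>
      obtain ⟨g0, g1, g2, g3⟩ := pvPrevFree_spec hp
      by_cases hrc : r = c
      · subst hrc
        exact absurd rfl (hnd i (pvNextFree_eq_some (by omega) hin hiL
          (fun y hy1 hy2 => g3 y (by omega) (by omega))))
      · refine pvPrevFree_eq_some g0 g1 ?_ (fun y hy1 hy2 => List.mem_cons_of_mem _ (g3 y hy1 hy2))
        rw [List.mem_cons]
        rintro (h | h)
        · exact hrc h
        · exact g2 h

lemma pvNextFree_cons {n : Int} {L : List Int} {c i : Int} (hiL : i ∉ L) (hi0 : 0 ≤ i)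
    (hpu : ∀ uu, pvPrevFree L (c-1) = some uu → i ≠ uu) :
    pvNextFree n (c :: L) (i+1) = pvNextFree n L (i+1) := by
  cases hp : pvNextFree n L (i+1) with
  | none =>
      exact pvNextFree_eq_none
        (fun y hy1 hy2 => List.mem_cons_of_mem _ (pvNextFree_all_of_none hp y hy1 hy2))
  | some r =>
      obtain ⟨g0, g1, g2, g3⟩ := pvNextFree_spec hp
      by_cases hrc : r = c
      · subst hrc
        exact absurd rfl (hpu i (pvPrevFree_eq_some hi0 (by omega) hiL
          (fun y hy1 hy2 => g3 y (by omega) (by omega))))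
      · refine pvNextFree_eq_some g0 g1 ?_ (fun y hy1 hy2 => List.mem_cons_of_mem _ (g3 y hy1 hy2))
        rw [List.mem_cons]
        rintro (h | h)
        · exact hrc h
        · exact g2 h

lemma pvA2 {n : Int} {L : List Int} {c dd : Int} (hnd : pvNextFree n L (c+1) = some dd) :
    pvPrevFree (c :: L) (dd-1) = pvPrevFree L (c-1) := by
  obtain ⟨g0, g1, g2, g3⟩ := pvNextFree_spec hnd
  cases hp : pvPrevFree L (c-1) with
  | none =>
      refine pvPrevFree_eq_none (fun y hy1 hy2 => ?_)
      rw [List.mem_cons]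
      rcases lt_trichotomy y c with h | h | h
      · exact Or.inr (pvPrevFree_all_of_none hp y hy1 (by omega))
      · exact Or.inl h
      · exact Or.inr (g3 y (by omega) (by omega))
  | some r =>
      obtain ⟨f0, f1, f2, f3⟩ := pvPrevFree_spec hp
      refine pvPrevFree_eq_some f0 (by omega) ?_ ?_
      · rw [List.mem_cons]
        rintro (h | h)
        · omega
        · exact f2 h
      · intro y hy1 hy2
        rw [List.mem_cons]
        rcases lt_trichotomy y c with h | h | h
        · exact Or.inr (f3 y hy1 (by omega))
        · exact Or.inl h
        · exact Or.inr (g3 y (by omega) (by omega))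

lemma pvA2' {n : Int} {L : List Int} {c uu : Int} (hpu : pvPrevFree L (c-1) = some uu) :
    pvNextFree n (c :: L) (uu+1) = pvNextFree n L (c+1) := by
  obtain ⟨g0, g1, g2, g3⟩ := pvPrevFree_spec hpu
  cases hp : pvNextFree n L (c+1) with
  | none =>
      refine pvNextFree_eq_none (fun y hy1 hy2 => ?_)
      rw [List.mem_cons]
      rcases lt_trichotomy y c with h | h | h
      · exact Or.inr (g3 y (by omega) (by omega))
      · exact Or.inl h
      · exact Or.inr (pvNextFree_all_of_none hp y (by omega) hy2)
  | some r =>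
      obtain ⟨f0, f1, f2, f3⟩ := pvNextFree_spec hp
      refine pvNextFree_eq_some (by omega) f1 ?_ ?_
      · rw [List.mem_cons]
        rintro (h | h)
        · omega
        · exact f2 h
      · intro y hy1 hy2
        rw [List.mem_cons]
        rcases lt_trichotomy y c with h | h | h
        · exact Or.inr (g3 y (by omega) (by omega))
        · exact Or.inl h
        · exact Or.inr (f3 y (by omega) hy2)

lemma pvA3 {n : Int} {L : List Int} {d dd : Int} (hd0 : 0 ≤ d) (hdL : d ∉ L)
    (hnd : pvNextFree n L (d+1) = some dd) : pvPrevFree L (dd-1) = some d := by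
  obtain ⟨g0, g1, g2, g3⟩ := pvNextFree_spec hnd
  exact pvPrevFree_eq_some hd0 (by omega) hdL (fun y hy1 hy2 => g3 y (by omega) (by omega))

lemma pvA3' {n : Int} {L : List Int} {d uu : Int} (hdn : d < n) (hdL : d ∉ L)
    (hpu : pvPrevFree L (d-1) = some uu) : pvNextFree n L (uu+1) = some d := by
  obtain ⟨g0, g1, g2, g3⟩ := pvPrevFree_spec hpu
  exact pvNextFree_eq_some (by omega) hdn hdL (fun y hy1 hy2 => g3 y (by omega) (by omega))

-- the optional pointer write of A's C/Z branches
-- pointer invariant after a C step (delete c), given the two optional writes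
lemma pvCInvPtr {n : Int} {st : List Int} {c : Int} {up down up' down' : List (Option Int)}
    (hc0 : 0 ≤ c) (hcn : c < n)
    (hptr : pvPtrInv n st up down)
    (hupChar : ∀ e : Int, 0 ≤ e → PySem.List.pyGet? up' e =
      if pvNextFree n st (c+1) = some e then some (pvPrevFree st (c-1)) else PySem.List.pyGet? up e)
    (hdownChar : ∀ e : Int, 0 ≤ e → PySem.List.pyGet? down' e =
      if pvPrevFree st (c-1) = some e then some (pvNextFree n st (c+1)) else PySem.List.pyGet? down e) :
    pvPtrInv n (c :: st) up' down' := by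
  intro i hi0 hin hinot
  rw [List.mem_cons] at hinot
  push Not at hinot
  obtain ⟨hic, hist⟩ := hinot
  have hbase := hptr i hi0 hin hist
  constructor
  · rw [hupChar i hi0]
    by_cases hidd : pvNextFree n st (c+1) = some i
    · rw [if_pos hidd, pvA2 hidd]
    · rw [if_neg hidd, hbase.1, pvPrevFree_cons hist hin (fun dd hdd hie => hidd (hie ▸ hdd))]
  · rw [hdownChar i hi0]
    by_cases hiuu : pvPrevFree st (c-1) = some i
    · rw [if_pos hiuu, pvA2' hiuu]
    · rw [if_neg hiuu, hbase.2, pvNextFree_cons hist hi0 (fun uu huu hie => hiuu (hie ▸ huu))]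

lemma pvCInvStack {n : Int} {st : List Int} {c : Int} {up down up' down' : List (Option Int)}
    (hvs : pvValidSt n st) (hc0 : 0 ≤ c) (hcn : c < n) (hcst : c ∉ st)
    (hptr : pvPtrInv n st up down) (hsi : pvStackInv n up down st)
    (hupChar : ∀ e : Int, 0 ≤ e → PySem.List.pyGet? up' e =
      if pvNextFree n st (c+1) = some e then some (pvPrevFree st (c-1)) else PySem.List.pyGet? up e)
    (hdownChar : ∀ e : Int, 0 ≤ e → PySem.List.pyGet? down' e =
      if pvPrevFree st (c-1) = some e then some (pvNextFree n st (c+1)) else PySem.List.pyGet? down e) :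
    pvStackInv n up' down' (c :: st) := by
  refine ⟨?_, ?_, pvStackInv_congr ?_ ?_ hsi⟩
  · rw [hupChar c hc0, if_neg (fun hdd => by have := (pvNextFree_spec hdd).1; omega)]
    exact (hptr c hc0 hcn hcst).1
  · rw [hdownChar c hc0, if_neg (fun huu => by have := (pvPrevFree_spec huu).2.1; omega)]
    exact (hptr c hc0 hcn hcst).2
  · intro e he
    rw [hupChar e (hvs.2 e he).1, if_neg (fun hdd => (pvNextFree_spec hdd).2.2.1 he)]
  · intro e he
    rw [hdownChar e (hvs.2 e he).1, if_neg (fun huu => (pvPrevFree_spec huu).2.2.1 he)]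

-- pointer invariant after a Z step (restore d)
lemma pvZInvPtr {n : Int} {rest : List Int} {d : Int} {up down up' down' : List (Option Int)}
    (hd0 : 0 ≤ d) (hdn : d < n) (hdrest : d ∉ rest)
    (hptr : pvPtrInv n (d :: rest) up down)
    (hup_d : PySem.List.pyGet? up d = some (pvPrevFree rest (d-1)))
    (hdn_d : PySem.List.pyGet? down d = some (pvNextFree n rest (d+1)))
    (hupChar : ∀ e : Int, 0 ≤ e → PySem.List.pyGet? up' e =
      if pvNextFree n rest (d+1) = some e then some (some d) else PySem.List.pyGet? up e)
    (hdownChar : ∀ e : Int, 0 ≤ e → PySem.List.pyGet? down' e =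
      if pvPrevFree rest (d-1) = some e then some (some d) else PySem.List.pyGet? down e) :
    pvPtrInv n rest up' down' := by
  intro i hi0 hin hirest
  by_cases hid : i = d
  · subst hid
    constructor
    · rw [hupChar i hi0, if_neg (fun hdd => by have := (pvNextFree_spec hdd).1; omega), hup_d]
    · rw [hdownChar i hi0, if_neg (fun huu => by have := (pvPrevFree_spec huu).2.1; omega), hdn_d]
  · have hist : i ∉ d :: rest := by
      rw [List.mem_cons]; push Not; exact ⟨hid, hirest⟩
    have hbase := hptr i hi0 hin hist
    constructor
    · rw [hupChar i hi0]
      by_cases hidd : pvNextFree n rest (d+1) = some i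
      · rw [if_pos hidd, pvA3 hd0 hdrest hidd]
      · rw [if_neg hidd, hbase.1,
            ← pvPrevFree_cons hirest hin (fun dd hdd hie => hidd (hie ▸ hdd))]
    · rw [hdownChar i hi0]
      by_cases hiuu : pvPrevFree rest (d-1) = some i
      · rw [if_pos hiuu, pvA3' hdn hdrest hiuu]
      · rw [if_neg hiuu, hbase.2,
            ← pvNextFree_cons hirest hi0 (fun uu huu hie => hiuu (hie ▸ huu))]

lemma pvZInvStack {n : Int} {rest : List Int} {d : Int} {up down up' down' : List (Option Int)}
    (hvrest : ∀ e ∈ rest, 0 ≤ e ∧ e < n)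
    (hsi : pvStackInv n up down rest)
    (hupChar : ∀ e : Int, 0 ≤ e → PySem.List.pyGet? up' e =
      if pvNextFree n rest (d+1) = some e then some (some d) else PySem.List.pyGet? up e)
    (hdownChar : ∀ e : Int, 0 ≤ e → PySem.List.pyGet? down' e =
      if pvPrevFree rest (d-1) = some e then some (some d) else PySem.List.pyGet? down e) :
    pvStackInv n up' down' rest := by
  refine pvStackInv_congr ?_ ?_ hsi
  · intro e he
    rw [hupChar e (hvrest e he).1, if_neg (fun hdd => (pvNextFree_spec hdd).2.2.1 he)]
  · intro e he
    rw [hdownChar e (hvrest e he).1, if_neg (fun huu => (pvPrevFree_spec huu).2.2.1 he)]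


-- A simulates the abstract step
lemma pvStepA_sim {n : Int} {s s' : Int × List Int} {command : String}
    (h : pvStepS n s command = some s') {a : PvStA} (ha : pvInvA n s a) :
    ∃ a', pvStepA a command = some a' ∧ pvInvA n s' a' := by
  obtain ⟨hvs, hans, hul, hdl, hk, hstk, hptr, hsi⟩ := ha
  simp only [pvStepS] at h
  simp only [pvPrevFreeF_eq, pvNextFreeF_eq] at h
  simp only [pvStepA]
  cases hp0 : PySem.List.pyGet? (PySem.Str.split₀ command) 0 with
  | none => simp only [hp0] at h; simp at h
  | some c0 =>
      simp only [hp0] at h ⊢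
      by_cases hU : c0 = "U"
      · rw [if_pos hU] at h ⊢
        cases hp1 : PySem.List.pyGet? (PySem.Str.split₀ command) 1 with
        | none => simp only [hp1] at h; simp at h
        | some s1 =>
            simp only [hp1] at h ⊢
            cases hp2 : PySem.Int.ofStr? s1 with
            | none => simp only [hp2] at h; simp at h
            | some count =>
                simp only [hp2] at h ⊢
                by_cases hle : count ≤ 0
                · rw [if_pos hle] at h
                  injection h with h'
                  subst h'
                  have h0 : count.toNat = 0 := by omega
                  rw [h0]
                  exact ⟨_, rfl, hvs, hans, hul, hdl, hk, hstk, hptr, hsi⟩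
                · rw [if_neg hle] at h
                  split at h
                  next halive =>
                    cases hw : pvWalkS s.2 s.1 count.toNat with
                    | none => rw [hw] at h; simp at h
                    | some c' =>
                        rw [hw] at h
                        injection h with h'
                        subst h'
                        obtain ⟨hwa, _⟩ :=
                          pvWalkA_up hptr count.toNat s.1 c' halive.1 halive.2.1 halive.2.2 hw
                        rw [hk, hwa]
                        exact ⟨_, rfl, hvs, hans, hul, hdl, rfl, hstk, hptr, hsi⟩
                  next => simp at h
      · rw [if_neg hU] at h ⊢
        by_cases hD : c0 = "D"
        · rw [if_pos hD] at h ⊢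
          cases hp1 : PySem.List.pyGet? (PySem.Str.split₀ command) 1 with
          | none => simp only [hp1] at h; simp at h
          | some s1 =>
              simp only [hp1] at h ⊢
              cases hp2 : PySem.Int.ofStr? s1 with
              | none => simp only [hp2] at h; simp at h
              | some count =>
                  simp only [hp2] at h ⊢
                  by_cases hle : count ≤ 0
                  · rw [if_pos hle] at h
                    injection h with h'
                    subst h'
                    have h0 : count.toNat = 0 := by omega
                    rw [h0]
                    exact ⟨_, rfl, hvs, hans, hul, hdl, hk, hstk, hptr, hsi⟩
                  · rw [if_neg hle] at h
                    split at h
                    next halive =>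
                      cases hw : pvWalkSD n s.2 s.1 count.toNat with
                      | none => rw [hw] at h; simp at h
                      | some c' =>
                          rw [hw] at h
                          injection h with h'
                          subst h'
                          obtain ⟨hwa, _⟩ :=
                            pvWalkA_down hptr count.toNat s.1 c' halive.1 halive.2.1 halive.2.2 hw
                          rw [hk, hwa]
                          exact ⟨_, rfl, hvs, hans, hul, hdl, rfl, hstk, hptr, hsi⟩
                    next => simp at h
        · rw [if_neg hD] at h ⊢
          by_cases hC : c0 = "C"
          · rw [if_pos hC] at h ⊢
            split at h
            next halive =>
              obtain ⟨hc0, hcn, hcst⟩ := halive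
              -- from c+1 up / c-1 down, the abstract step on c :: st sees the rows of st
              rw [pvNextFree_cons hcst hc0
                    (fun uu huu hie => by have := (pvPrevFree_spec huu).2.1; omega),
                  pvPrevFree_cons hcst hcn
                    (fun dd hdd hie => by have := (pvNextFree_spec hdd).1; omega)] at h
              rw [hk]
              have hansX : PySem.List.pySet? a.answer s.1 'X' = some (pvRender n (s.1 :: s.2)) := by
                rw [hans]
                refine pvRender_set hc0 hcn ?_ (if_pos List.mem_cons_self)
                intro x hx
                rw [List.mem_cons]
                constructor
                · exact Or.inr
                · rintro (he | hm)
                  · exact absurd he hx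
                  · exact hm
              have hupc := (hptr s.1 hc0 hcn hcst).1
              have hdnc := (hptr s.1 hc0 hcn hcst).2
              simp only [hansX, hupc, hdnc]
              have hvs' : pvValidSt n (s.1 :: s.2) := by
                refine ⟨List.nodup_cons.mpr ⟨hcst, hvs.1⟩, ?_⟩
                intro e he
                rcases List.mem_cons.mp he with rfl | he'
                · exact ⟨hc0, hcn⟩
                · exact hvs.2 e he'
              have hstk' : a.stack ++ [s.1] = (s.1 :: s.2).reverse := by
                rw [hstk, List.reverse_cons]
              cases hpu : pvPrevFree s.2 (s.1 - 1) with
              | none =>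
                  rw [hpu] at h
                  have hdownChar : ∀ e : Int, 0 ≤ e → PySem.List.pyGet? a.down e =
                      if pvPrevFree s.2 (s.1-1) = some e then some (pvNextFree n s.2 (s.1+1))
                      else PySem.List.pyGet? a.down e := by
                    intro e he
                    rw [hpu, if_neg (by simp)]
                  simp only [hdnc]
                  cases hnd : pvNextFree n s.2 (s.1 + 1) with
                  | some dd =>
                      rw [hnd] at h
                      injection h with h'
                      subst h'
                      have hsnd := pvNextFree_spec hnd
                      have hrangeu : dd.toNat < a.up.length := by rw [hul]; omega
                      have hsetuL := pvSet_of_nonneg (by omega : (0:Int) ≤ dd) hrangeu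
                        (none : Option Int)
                      have hupChar : ∀ e : Int, 0 ≤ e →
                          PySem.List.pyGet? (a.up.set dd.toNat none) e =
                          if pvNextFree n s.2 (s.1+1) = some e then some (pvPrevFree s.2 (s.1-1))
                          else PySem.List.pyGet? a.up e := by
                        intro e he
                        rw [hnd, hpu]
                        by_cases hed : e = dd
                        · subst hed
                          rw [if_pos rfl]
                          exact pvGet_set_self (by omega) hsetuL
                        · rw [if_neg (by simpa [eq_comm] using hed)]
                          exact pvGet_set_ne (by omega) he hed hsetuL
                      simp only [hsetuL]
                      refine ⟨_, rfl, hvs', rfl, ?_, hdl, rfl, hstk', ?_, ?_⟩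
                      · rw [List.length_set, hul]
                      · exact pvCInvPtr hc0 hcn hptr hupChar hdownChar
                      · exact pvCInvStack hvs hc0 hcn hcst hptr hsi hupChar hdownChar
                  | none =>
                      rw [hnd] at h
                      simp at h
              | some uu =>
                  rw [hpu] at h
                  have hspu := pvPrevFree_spec hpu
                  have hranged : uu.toNat < a.down.length := by rw [hdl]; omega
                  have hsetd := pvSet_of_nonneg hspu.1 hranged (pvNextFree n s.2 (s.1+1))
                  have hdownChar : ∀ e : Int, 0 ≤ e →
                      PySem.List.pyGet? (a.down.set uu.toNat (pvNextFree n s.2 (s.1+1))) e =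
                      if pvPrevFree s.2 (s.1-1) = some e then some (pvNextFree n s.2 (s.1+1))
                      else PySem.List.pyGet? a.down e := by
                    intro e he
                    rw [hpu]
                    by_cases heu : e = uu
                    · subst heu
                      rw [if_pos rfl]
                      exact pvGet_set_self hspu.1 hsetd
                    · rw [if_neg (by simpa [eq_comm] using heu)]
                      exact pvGet_set_ne hspu.1 he heu hsetd
                  simp only [hsetd]
                  have hreread : PySem.List.pyGet?
                      (a.down.set uu.toNat (pvNextFree n s.2 (s.1+1))) s.1 =
                      some (pvNextFree n s.2 (s.1+1)) := by
                    rw [pvGet_set_ne hspu.1 hc0 (by omega) hsetd, hdnc]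
                  simp only [hreread]
                  cases hnd : pvNextFree n s.2 (s.1 + 1) with
                  | some dd =>
                      rw [hnd] at h
                      injection h with h'
                      subst h'
                      have hsnd := pvNextFree_spec hnd
                      have hrangeu : dd.toNat < a.up.length := by rw [hul]; omega
                      have hsetuL := pvSet_of_nonneg (by omega : (0:Int) ≤ dd) hrangeu (some uu)
                      have hsetuS := pvSet_of_nonneg (by omega : (0:Int) ≤ dd) hrangeu
                        (pvPrevFree s.2 (s.1-1))
                      have hupChar : ∀ e : Int, 0 ≤ e →
                          PySem.List.pyGet? (a.up.set dd.toNat (pvPrevFree s.2 (s.1-1))) e =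
                          if pvNextFree n s.2 (s.1+1) = some e then some (pvPrevFree s.2 (s.1-1))
                          else PySem.List.pyGet? a.up e := by
                        intro e he
                        rw [hnd]
                        by_cases hed : e = dd
                        · subst hed
                          rw [if_pos rfl]
                          exact pvGet_set_self (by omega) hsetuS
                        · rw [if_neg (by simpa [eq_comm] using hed)]
                          exact pvGet_set_ne (by omega) he hed hsetuS
                      simp only [hsetuL]
                      refine ⟨_, rfl, hvs', rfl, ?_, ?_, rfl, hstk', ?_, ?_⟩
                      · rw [List.length_set, hul]
                      · rw [List.length_set, hdl]
                      · rw [← hpu, ← hnd]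
                        exact pvCInvPtr hc0 hcn hptr hupChar hdownChar
                      · rw [← hpu, ← hnd]
                        exact pvCInvStack hvs hc0 hcn hcst hptr hsi hupChar hdownChar
                  | none =>
                      rw [hnd] at h
                      injection h with h'
                      subst h'
                      have hupChar : ∀ e : Int, 0 ≤ e → PySem.List.pyGet? a.up e =
                          if pvNextFree n s.2 (s.1+1) = some e then some (pvPrevFree s.2 (s.1-1))
                          else PySem.List.pyGet? a.up e := by
                        intro e he
                        rw [hnd, if_neg (by simp)]
                      simp only [hupc, hpu]
                      refine ⟨_, rfl, hvs', rfl, hul, ?_, rfl, hstk', ?_, ?_⟩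
                      · rw [List.length_set, hdl]
                      · rw [← hpu, ← hnd]
                        exact pvCInvPtr hc0 hcn hptr hupChar hdownChar
                      · rw [← hpu, ← hnd]
                        exact pvCInvStack hvs hc0 hcn hcst hptr hsi hupChar hdownChar
            next => simp at h
          · rw [if_neg hC] at h ⊢
            by_cases hZ : c0 = "Z"
            · rw [if_pos hZ] at h ⊢
              cases hstkc : s.2 with
              | nil => rw [hstkc] at h; simp at h
              | cons d rest =>
                  rw [hstkc] at h
                  injection h with h'
                  subst h'
                  have hvs2 := hvs
                  rw [hstkc] at hvs2
                  have hd0 : 0 ≤ d := (hvs2.2 d List.mem_cons_self).1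
                  have hdn : d < n := (hvs2.2 d List.mem_cons_self).2
                  have hdrest : d ∉ rest := (List.nodup_cons.mp hvs2.1).1
                  have hvrest : ∀ e ∈ rest, 0 ≤ e ∧ e < n :=
                    fun e he => hvs2.2 e (List.mem_cons_of_mem _ he)
                  have hsi2 := hsi
                  rw [hstkc] at hsi2
                  obtain ⟨hup_d, hdn_d, hsirest⟩ := hsi2
                  have hpop : a.stack = rest.reverse ++ [d] := by
                    rw [hstk, hstkc, List.reverse_cons]
                  rw [hpop, pvPop_append]
                  have hansO : PySem.List.pySet? a.answer d 'O' = some (pvRender n rest) := by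
                    rw [hans, hstkc]
                    refine pvRender_set hd0 hdn ?_ (if_neg hdrest)
                    intro x hx
                    rw [List.mem_cons]
                    constructor
                    · rintro (he | hm)
                      · exact absurd he hx
                      · exact hm
                    · exact Or.inr
                  simp only [hansO, hup_d, hdn_d]
                  have hptr2 : pvPtrInv n (d :: rest) a.up a.down := by
                    rw [← hstkc]; exact hptr
                  cases hpu : pvPrevFree rest (d - 1) with
                  | none =>
                      have hdownChar : ∀ e : Int, 0 ≤ e → PySem.List.pyGet? a.down e =
                          if pvPrevFree rest (d-1) = some e then some (some d)
                          else PySem.List.pyGet? a.down e := by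
                        intro e he
                        rw [hpu, if_neg (by simp)]
                      simp only [hdn_d]
                      cases hnd : pvNextFree n rest (d + 1) with
                      | some dd =>
                          have hsnd := pvNextFree_spec hnd
                          have hrangeu : dd.toNat < a.up.length := by rw [hul]; omega
                          have hsetu := pvSet_of_nonneg (by omega : (0:Int) ≤ dd) hrangeu (some d)
                          have hupChar : ∀ e : Int, 0 ≤ e →
                              PySem.List.pyGet? (a.up.set dd.toNat (some d)) e =
                              if pvNextFree n rest (d+1) = some e then some (some d)
                              else PySem.List.pyGet? a.up e := by
                            intro e he
                            rw [hnd]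
                            by_cases hed : e = dd
                            · subst hed
                              rw [if_pos rfl]
                              exact pvGet_set_self (by omega) hsetu
                            · rw [if_neg (by simpa [eq_comm] using hed)]
                              exact pvGet_set_ne (by omega) he hed hsetu
                          simp only [hsetu]
                          refine ⟨_, rfl, ⟨(List.nodup_cons.mp hvs2.1).2, hvrest⟩, rfl, ?_, hdl,
                            hk, rfl, ?_, ?_⟩
                          · rw [List.length_set, hul]
                          · exact pvZInvPtr hd0 hdn hdrest hptr2 hup_d hdn_d hupChar hdownChar
                          · exact pvZInvStack hvrest hsirest hupChar hdownChar
                      | none =>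
                          have hupChar : ∀ e : Int, 0 ≤ e → PySem.List.pyGet? a.up e =
                              if pvNextFree n rest (d+1) = some e then some (some d)
                              else PySem.List.pyGet? a.up e := by
                            intro e he
                            rw [hnd, if_neg (by simp)]
                          refine ⟨_, rfl, ⟨(List.nodup_cons.mp hvs2.1).2, hvrest⟩, rfl, hul, hdl,
                            hk, rfl, ?_, ?_⟩
                          · exact pvZInvPtr hd0 hdn hdrest hptr2 hup_d hdn_d hupChar hdownChar
                          · exact pvZInvStack hvrest hsirest hupChar hdownChar
                  | some uu =>
                      have hspu := pvPrevFree_spec hpu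
                      have hranged : uu.toNat < a.down.length := by rw [hdl]; omega
                      have hsetd := pvSet_of_nonneg hspu.1 hranged (some d)
                      have hdownChar : ∀ e : Int, 0 ≤ e →
                          PySem.List.pyGet? (a.down.set uu.toNat (some d)) e =
                          if pvPrevFree rest (d-1) = some e then some (some d)
                          else PySem.List.pyGet? a.down e := by
                        intro e he
                        rw [hpu]
                        by_cases heu : e = uu
                        · subst heu
                          rw [if_pos rfl]
                          exact pvGet_set_self hspu.1 hsetd
                        · rw [if_neg (by simpa [eq_comm] using heu)]
                          exact pvGet_set_ne hspu.1 he heu hsetd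
                      simp only [hsetd]
                      have hreread : PySem.List.pyGet? (a.down.set uu.toNat (some d)) d =
                          some (pvNextFree n rest (d+1)) := by
                        rw [pvGet_set_ne hspu.1 hd0 (by omega) hsetd, hdn_d]
                      simp only [hreread]
                      cases hnd : pvNextFree n rest (d + 1) with
                      | some dd =>
                          have hsnd := pvNextFree_spec hnd
                          have hrangeu : dd.toNat < a.up.length := by rw [hul]; omega
                          have hsetu := pvSet_of_nonneg (by omega : (0:Int) ≤ dd) hrangeu (some d)
                          have hupChar : ∀ e : Int, 0 ≤ e →
                              PySem.List.pyGet? (a.up.set dd.toNat (some d)) e =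
                              if pvNextFree n rest (d+1) = some e then some (some d)
                              else PySem.List.pyGet? a.up e := by
                            intro e he
                            rw [hnd]
                            by_cases hed : e = dd
                            · subst hed
                              rw [if_pos rfl]
                              exact pvGet_set_self (by omega) hsetu
                            · rw [if_neg (by simpa [eq_comm] using hed)]
                              exact pvGet_set_ne (by omega) he hed hsetu
                          simp only [hsetu]
                          refine ⟨_, rfl, ⟨(List.nodup_cons.mp hvs2.1).2, hvrest⟩, rfl, ?_, ?_,
                            hk, rfl, ?_, ?_⟩
                          · rw [List.length_set, hul]
                          · rw [List.length_set, hdl]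
                          · exact pvZInvPtr hd0 hdn hdrest hptr2 hup_d hdn_d hupChar hdownChar
                          · exact pvZInvStack hvrest hsirest hupChar hdownChar
                      | none =>
                          have hupChar : ∀ e : Int, 0 ≤ e → PySem.List.pyGet? a.up e =
                              if pvNextFree n rest (d+1) = some e then some (some d)
                              else PySem.List.pyGet? a.up e := by
                            intro e he
                            rw [hnd, if_neg (by simp)]
                          refine ⟨_, rfl, ⟨(List.nodup_cons.mp hvs2.1).2, hvrest⟩, rfl, hul, ?_,
                            hk, rfl, ?_, ?_⟩
                          · rw [List.length_set, hdl]
                          · exact pvZInvPtr hd0 hdn hdrest hptr2 hup_d hdn_d hupChar hdownChar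
                          · exact pvZInvStack hvrest hsirest hupChar hdownChar
            · rw [if_neg hZ] at h ⊢
              injection h with h'
              subst h'
              exact ⟨a, rfl, hvs, hans, hul, hdl, hk, hstk, hptr, hsi⟩


lemma pvFoldl_none {α β : Type} (g : α → β → Option α) :
    ∀ l : List β, l.foldl (fun acc x => acc.bind (fun y => g y x)) none = none := by
  intro l
  induction l with
  | nil => rfl
  | cons a t ih => simpa using ih

-- folding the three steps over the command list
lemma pvRun_sim {n : Int} : ∀ (cmds : List String) (s : Int × List Int) (a : PvStA) (b : PvStB),
    pvInvA n s a → pvInvB n s b →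
    ∀ s', cmds.foldl (fun acc command => acc.bind (fun x => pvStepS n x command)) (some s) = some s' →
    ∃ a' b',
      cmds.foldl (fun acc command => acc.bind (fun st => pvStepA st command)) (some a) = some a' ∧
      cmds.foldl (fun acc command => acc.bind (fun st => pvStepB n st command)) (some b) = some b' ∧
      pvInvA n s' a' ∧ pvInvB n s' b' := by
  intro cmds
  induction cmds with
  | nil =>
      intro s a b ha hb s' h
      simp only [List.foldl_nil] at h ⊢
      injection h with h'
      subst h'
      exact ⟨a, b, rfl, rfl, ha, hb⟩
  | cons command rest ih =>
      intro s a b ha hb s' h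
      simp only [List.foldl_cons, Option.bind_some] at h ⊢
      cases h1 : pvStepS n s command with
      | none =>
          rw [h1, pvFoldl_none] at h
          simp at h
      | some s1 =>
          rw [h1] at h
          obtain ⟨a1, ha1, hia1⟩ := pvStepA_sim h1 ha
          obtain ⟨b1, hb1, hib1⟩ := pvStepB_sim h1 hb
          rw [ha1, hb1]
          exact ih s1 a1 b1 hia1 hib1 s' h

-- the initial states satisfy the invariants
lemma pvInitB {n k : Int} : pvInvB n (k, []) ⟨PySem.Set.empty, k, []⟩ := by
  refine ⟨⟨List.nodup_nil, fun d hd => nomatch hd⟩, List.nodup_nil, ?_, rfl, rfl⟩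
  intro x
  exact Iff.rfl

lemma pvPrevFree_nil {c : Int} : pvPrevFree [] c = if c < 0 then none else some c := by
  rw [pvPrevFree]
  simp

lemma pvNextFree_nil {n c : Int} : pvNextFree n [] c = if n ≤ c then none else some c := by
  rw [pvNextFree]
  simp

lemma pvInitA {n k : Int} : pvInvA n (k, [])
    ⟨(PySem.List.pyRange 0 n 1).map (fun _ => 'O'),
     none :: (PySem.List.pyRange 0 (n-1) 1).map some,
     (PySem.List.pyRange 1 n 1).map some ++ [none], some k, []⟩ := by
  refine ⟨⟨List.nodup_nil, fun d hd => nomatch hd⟩, ?_, ?_, ?_, rfl, rfl, ?_, trivial⟩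
  · simp [pvRender]
  · simp only [List.length_cons, List.length_map, PySem.List.length_pyRange_one]
    omega
  · simp only [List.length_append, List.length_map, PySem.List.length_pyRange_one,
      List.length_cons, List.length_nil]
    omega
  · intro i hi0 hin _
    constructor
    · by_cases hiz : i = 0
      · subst hiz
        rw [PySem.List.pyGet?_zero_cons, pvPrevFree_nil, if_pos (by omega)]
      · rw [pvGet_of_nonneg hi0]
        have hsucc : i.toNat = (i.toNat - 1) + 1 := by omega
        have hlen : i.toNat - 1 < ((PySem.List.pyRange 0 (n-1) 1).map some).length := by
          simp only [List.length_map, PySem.List.length_pyRange_one]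
          omega
        rw [hsucc, List.getElem?_cons_succ, List.getElem?_eq_getElem hlen, List.getElem_map,
            PySem.List.getElem_pyRange_one]
        rw [pvPrevFree_nil, if_neg (by omega)]
        congr 2
        omega
    · rw [pvGet_of_nonneg hi0]
      by_cases hitop : i = n - 1
      · have hidx : i.toNat = ((PySem.List.pyRange 1 n 1).map some).length := by
          simp [PySem.List.length_pyRange_one]
          omega
        rw [hidx, List.getElem?_append_right (le_refl _)]
        simp only [Nat.sub_self, List.getElem?_cons_zero]
        rw [pvNextFree_nil, if_pos (by omega)]
      · have hlt : i.toNat < ((PySem.List.pyRange 1 n 1).map some).length := by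
          simp [PySem.List.length_pyRange_one]
          omega
        have hlen2 : i.toNat < ((PySem.List.pyRange 1 n 1).map some).length := hlt
        rw [List.getElem?_append_left hlt, List.getElem?_eq_getElem hlen2, List.getElem_map,
            PySem.List.getElem_pyRange_one]
        rw [pvNextFree_nil, if_neg (by omega)]
        congr 2
        omega

-- ===== VERDICT (by name: the statement is the Claim_ definition above) =====
theorem solution_spec : Claim_equal_solution := by
  intro n k cmd _ hpre
  unfold Spec_solution
  rw [Pre_solution] at hpre
  obtain ⟨s', hs'⟩ := Option.isSome_iff_exists.mp hpre
  unfold pvRunS at hs'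
  obtain ⟨a', b', ha', hb', hia, hib⟩ :=
    pvRun_sim cmd (k, []) _ _ pvInitA pvInitB s' hs'
  simp only [solution, solution_alt]
  rw [ha', hb']
  simp only [PySem.List.foldl_append_singleton_eq_self, List.nil_append]
  rw [hia.2.1]
  congr 1
  unfold pvRender
  refine List.map_congr_left (fun x _ => ?_)
  have hmem : x ∈ b'.deleted ↔ x ∈ s'.2 := hib.2.2.1 x
  by_cases hx : x ∈ s'.2
  · rw [if_pos hx, if_pos ((PySem.Set.contains_iff _ _).mpr (hmem.mpr hx))]
  · rw [if_neg hx, if_neg (fun hc => hx (hmem.mp ((PySem.Set.contains_iff _ _).mp hc)))]
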